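-- pv_equiv track=rewrite | github.com/hillba88/Bioinformatic-Programming | hw4-4.py | check_stop
-- ===== SOURCE A (Python) =====
-- STOP_CODONS = ['TAG', 'TAA', 'TGA']
--
-- def rev_comp(seq):
--     ret_seq = ""
--
--     for nuc in seq[::-1]:
--         if nuc == 'A':
--             ret_seq += 'T'
--         if nuc == 'C':
--             ret_seq += 'G'
--         if nuc == 'G':
--             ret_seq += 'C'
--         if nuc == 'T':
--             ret_seq += 'A'
--
--     return ret_seq
--
-- def check_stop(seq):
--     # Check for each codon in forward sequence
--     for codon in STOP_CODONS:
--         if codon in seq: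
--             return True
--
--     # Check for each codon in reverse sequence
--     reverse = rev_comp(seq)
--
--     for codon in STOP_CODONS:
--         if codon in reverse:
--             return True
--
--     return False
-- ===== SOURCE B (Python) =====
-- STOP_SET = {'TAG', 'TAA', 'TGA'}
-- COMP = {'A': 'T', 'C': 'G', 'G': 'C', 'T': 'A'}
--
-- def rev_comp(seq):
--     return ''.join(COMP[c] for c in reversed(seq) if c in COMP)
--
-- def _has_stop(s):
--     for i in range(len(s) - 2):
--         if s[i:i+3] in STOP_SET:
--             return True
--     return False
--
-- def check_stop(seq):
--     return _has_stop(seq) or _has_stop(rev_comp(seq))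
-- ===== Notes on version B (the rewrite author's own statement) =====
-- stated objective: alternative
-- what changed: A runs three whole-string substring searches on the sequence and again on its reverse complement (built by four chained if-appends); B makes one positional windowed scan per strand testing each 3-character slice against a stop-codon set, and builds the reverse complement by a complement-map filter.
import Mathlib
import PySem

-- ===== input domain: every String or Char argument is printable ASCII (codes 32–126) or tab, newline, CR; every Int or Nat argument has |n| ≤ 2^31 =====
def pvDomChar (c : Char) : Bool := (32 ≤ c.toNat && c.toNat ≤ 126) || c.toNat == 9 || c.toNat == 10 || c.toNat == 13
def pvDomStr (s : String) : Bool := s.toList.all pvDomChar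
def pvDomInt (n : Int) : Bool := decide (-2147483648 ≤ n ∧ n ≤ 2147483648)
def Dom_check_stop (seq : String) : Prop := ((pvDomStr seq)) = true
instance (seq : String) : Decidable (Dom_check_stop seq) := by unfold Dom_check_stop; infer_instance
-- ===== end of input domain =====

-- B replaces A's three whole-string substring searches per strand by one windowed scan
-- with set membership, and builds the reverse complement from a complement map (alternative decomposition).

-- ===== PORT A =====
def STOP_CODONS : List String := ["TAG", "TAA", "TGA"]

-- seq[::-1] is reverse (PySem.List.slice?_none_none_neg_one); the four successive ifs append as in A
def rev_comp (seq : String) : String :=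
  String.ofList (seq.toList.reverse.foldl
    (fun ret nuc =>
      let r1 := if nuc = 'A' then ret ++ ['T'] else ret
      let r2 := if nuc = 'C' then r1 ++ ['G'] else r1
      let r3 := if nuc = 'G' then r2 ++ ['C'] else r2
      if nuc = 'T' then r3 ++ ['A'] else r3) [])

def check_stop (seq : String) : Bool :=
  -- 'for codon in STOP_CODONS: if codon in seq: return True' = any over the literal list
  if STOP_CODONS.any (fun codon => PySem.Str.isIn codon seq) then true
  else
    let reverse := rev_comp seq
    if STOP_CODONS.any (fun codon => PySem.Str.isIn codon reverse) then true
    else false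

-- ===== PORT B =====
def STOP_SET : List String := PySem.List.dedup ["TAG", "TAA", "TGA"]

def COMP : PySem.Dict Char Char := PySem.Dict.ofList [('A', 'T'), ('C', 'G'), ('G', 'C'), ('T', 'A')]

-- ''.join(COMP[c] for c in reversed(seq) if c in COMP)
def rev_comp_b (seq : String) : String :=
  String.ofList (seq.toList.reverse.filterMap (fun c => PySem.Dict.get? COMP c))

-- for i in range(len(s) - 2): if s[i:i+3] in STOP_SET: return True
def has_stop (s : String) : Bool :=
  (PySem.List.pyRange 0 (PySem.Str.len s - 2) 1).any
    (fun i => STOP_SET.contains (PySem.Str.slice s (some i) (some (i + 3))))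

def check_stop_alt (seq : String) : Bool :=
  has_stop seq || has_stop (rev_comp_b seq)

-- ===== PRECONDITION & SPEC =====
def Spec_check_stop (seq : String) (out : Bool) : Prop := out = check_stop_alt seq
instance (seq : String) (out : Bool) : Decidable (Spec_check_stop seq out) := by unfold Spec_check_stop; infer_instance

-- ===== CLAIM (what is proved, stated in full; the proofs are below) =====
def Claim_equal_check_stop : Prop := ∀ (seq : String), Dom_check_stop seq → Spec_check_stop seq (check_stop seq)

-- ===== LEMMAS AND PROOFS =====

-- one step of A's rev_comp loop emits exactly the complement-map image of the character
theorem revcomp_step (acc : List Char) (c : Char) :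
    (let r1 := if c = 'A' then acc ++ ['T'] else acc
     let r2 := if c = 'C' then r1 ++ ['G'] else r1
     let r3 := if c = 'G' then r2 ++ ['C'] else r2
     if c = 'T' then r3 ++ ['A'] else r3)
    = acc ++ (PySem.Dict.get? COMP c).toList := by
  have hitems : COMP.items = [('A', 'T'), ('C', 'G'), ('G', 'C'), ('T', 'A')] := by decide
  by_cases hA : c = 'A'
  · subst hA; simp [PySem.Dict.get?, hitems]
  · by_cases hC : c = 'C'
    · subst hC; simp [PySem.Dict.get?, hitems]
    · by_cases hG : c = 'G'
      · subst hG; simp [PySem.Dict.get?, hitems]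
      · by_cases hT : c = 'T'
        · subst hT; simp [PySem.Dict.get?, hitems]
        · have e1 : ('A' == c) = false := beq_eq_false_iff_ne.mpr (fun h => hA h.symm)
          have e2 : ('C' == c) = false := beq_eq_false_iff_ne.mpr (fun h => hC h.symm)
          have e3 : ('G' == c) = false := beq_eq_false_iff_ne.mpr (fun h => hG h.symm)
          have e4 : ('T' == c) = false := beq_eq_false_iff_ne.mpr (fun h => hT h.symm)
          simp [PySem.Dict.get?, hitems, e1, e2, e3, e4, hA, hC, hG, hT]

theorem revcomp_fold (l acc : List Char) :
    l.foldl (fun ret nuc =>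
      let r1 := if nuc = 'A' then ret ++ ['T'] else ret
      let r2 := if nuc = 'C' then r1 ++ ['G'] else r1
      let r3 := if nuc = 'G' then r2 ++ ['C'] else r2
      if nuc = 'T' then r3 ++ ['A'] else r3) acc
    = acc ++ l.filterMap (fun c => PySem.Dict.get? COMP c) := by
  induction l generalizing acc with
  | nil => simp
  | cons c t ih =>
    simp only [List.foldl_cons, List.filterMap_cons]
    rw [ih, revcomp_step]
    cases PySem.Dict.get? COMP c <;> simp

theorem rev_comp_eq (seq : String) : rev_comp seq = rev_comp_b seq := by
  unfold rev_comp rev_comp_b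
  rw [revcomp_fold, List.nil_append]

-- a length-3 codon occurs as a substring iff some 3-window of the list equals it
theorem window_iff (s c : List Char) (hc : c.length = 3) :
    (∃ i : Int, (0 ≤ i ∧ i < (s.length : Int) - 2) ∧
        PySem.List.slice s (some i) (some (i + 3)) = c)
    ↔ PySem.Chars.isIn c s = true := by
  rw [← PySem.Chars.exists_prefix_drop_iff_isIn]
  constructor
  · rintro ⟨i, ⟨h0, _⟩, heq⟩
    refine ⟨i.toNat, ?_⟩
    rw [PySem.List.slice_toNat s h0 (by omega)] at heq
    have h3 : (i + 3).toNat - i.toNat = 3 := by omega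
    rw [h3] at heq
    rw [List.prefix_iff_eq_take, hc]
    exact heq.symm
  · rintro ⟨j, hp⟩
    have hlen : c.length ≤ (s.drop j).length := hp.length_le
    rw [List.length_drop, hc] at hlen
    refine ⟨(j : Int), ⟨by positivity, by omega⟩, ?_⟩
    rw [PySem.List.slice_toNat s (by positivity) (by positivity)]
    have h3 : ((j : Int) + 3).toNat - ((j : Int)).toNat = 3 := by omega
    rw [h3, Int.toNat_natCast]
    rw [List.prefix_iff_eq_take, hc] at hp
    exact hp.symm

-- B's windowed scan over one string equals A's three substring tests on it
theorem has_stop_eq (s : String) :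
    has_stop s = STOP_CODONS.any (fun codon => PySem.Str.isIn codon s) := by
  rw [Bool.eq_iff_iff]
  unfold has_stop
  rw [List.any_eq_true]
  have hset : STOP_SET = ["TAG", "TAA", "TGA"] := by decide
  simp only [hset, PySem.Str.len_eq, PySem.List.mem_pyRange_one,
    List.contains_eq_mem, List.mem_cons, List.not_mem_nil, or_false,
    decide_eq_true_eq, STOP_CODONS, List.any_cons, List.any_nil,
    Bool.or_eq_true, Bool.false_eq_true, or_false]
  constructor
  · rintro ⟨i, hi, h | h | h⟩
    · exact Or.inl ((PySem.Str.isIn_iff_infix _ _).mpr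
        ((PySem.Chars.isIn_iff_infix _ _).mp ((window_iff s.toList "TAG".toList (by decide)).mp
          ⟨i, hi, by rw [← String.toList_inj] at h; simpa [PySem.Str.slice] using h⟩))
      )
    · exact Or.inr (Or.inl ((PySem.Str.isIn_iff_infix _ _).mpr
        ((PySem.Chars.isIn_iff_infix _ _).mp ((window_iff s.toList "TAA".toList (by decide)).mp
          ⟨i, hi, by rw [← String.toList_inj] at h; simpa [PySem.Str.slice] using h⟩))))
    · exact Or.inr (Or.inr ((PySem.Str.isIn_iff_infix _ _).mpr
        ((PySem.Chars.isIn_iff_infix _ _).mp ((window_iff s.toList "TGA".toList (by decide)).mp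
          ⟨i, hi, by rw [← String.toList_inj] at h; simpa [PySem.Str.slice] using h⟩))))
  · rintro (h | h | h)
    · obtain ⟨i, hi, heq⟩ := (window_iff s.toList "TAG".toList (by decide)).mpr
        ((PySem.Chars.isIn_iff_infix _ _).mpr ((PySem.Str.isIn_iff_infix _ _).mp h))
      exact ⟨i, hi, Or.inl (by rw [← String.toList_inj]; simpa [PySem.Str.slice] using heq)⟩
    · obtain ⟨i, hi, heq⟩ := (window_iff s.toList "TAA".toList (by decide)).mpr
        ((PySem.Chars.isIn_iff_infix _ _).mpr ((PySem.Str.isIn_iff_infix _ _).mp h))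
      exact ⟨i, hi, Or.inr (Or.inl (by rw [← String.toList_inj]; simpa [PySem.Str.slice] using heq))⟩
    · obtain ⟨i, hi, heq⟩ := (window_iff s.toList "TGA".toList (by decide)).mpr
        ((PySem.Chars.isIn_iff_infix _ _).mpr ((PySem.Str.isIn_iff_infix _ _).mp h))
      exact ⟨i, hi, Or.inr (Or.inr (by rw [← String.toList_inj]; simpa [PySem.Str.slice] using heq))⟩

-- ===== VERDICT (by name: the statement is the Claim_ definition above) =====
theorem check_stop_spec : Claim_equal_check_stop := by
  intro seq _
  unfold Spec_check_stop check_stop check_stop_alt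
  rw [rev_comp_eq, has_stop_eq, has_stop_eq]
  cases h1 : STOP_CODONS.any (fun codon => PySem.Str.isIn codon seq) <;>
    cases h2 : STOP_CODONS.any (fun codon => PySem.Str.isIn codon (rev_comp_b seq)) <;>
      (first | rfl | (simp only [h2]; rfl))
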